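-- pv_equiv track=rewrite | github.com/wesley1001/thsdk | src/thsdk/examples/dde.py | iter_block_market_codes
-- ===== SOURCE A (Python) =====
-- def iter_block_market_codes(block_codes: list[str]) -> dict[str, list[str]]:
--     market_codelist_map: dict[str, list[str]] = {}
--     for code in block_codes:
--         if len(code) != 10:
--             continue
--         market = code[:4]
--         codelist_code = code[4:]
--         market_codelist_map.setdefault(market, []).append(codelist_code)
--     return market_codelist_map
-- ===== SOURCE B (Python) =====
-- def iter_block_market_codes(block_codes: list[str]) -> dict[str, list[str]]:
--     codes = [c for c in block_codes if len(c) == 10]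
--     markets = []
--     for c in codes:
--         m = c[:4]
--         if m not in markets:
--             markets.append(m)
--     return {m: [c[4:] for c in codes if c[:4] == m] for m in markets}
-- ===== Notes on version B (the rewrite author's own statement) =====
-- stated objective: alternative
-- what changed: A builds the groups in a single pass with dict.setdefault bucketing; B makes two passes over the length-10 codes: it first collects the distinct 4-char market prefixes in first-occurrence order, then builds each market's suffix list by its own filtered comprehension.
import Mathlib
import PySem

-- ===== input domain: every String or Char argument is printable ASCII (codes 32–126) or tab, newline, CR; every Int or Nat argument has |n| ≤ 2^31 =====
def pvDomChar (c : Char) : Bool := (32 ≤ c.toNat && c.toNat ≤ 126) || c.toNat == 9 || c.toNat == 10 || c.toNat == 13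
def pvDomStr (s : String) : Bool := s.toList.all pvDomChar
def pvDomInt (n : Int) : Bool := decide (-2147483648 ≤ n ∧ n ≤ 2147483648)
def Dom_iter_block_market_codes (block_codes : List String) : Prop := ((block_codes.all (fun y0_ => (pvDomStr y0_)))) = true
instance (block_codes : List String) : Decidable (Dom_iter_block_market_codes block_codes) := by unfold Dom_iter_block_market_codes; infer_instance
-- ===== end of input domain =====

-- B replaces A's single-pass dict bucketing by a two-pass grouping (collect the distinct
-- 4-char market prefixes in first-occurrence order, then build each group by one filtered
-- comprehension over the length-10 codes); an alternative decomposition, not faster.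

-- ===== PORT A =====
def iter_block_market_codes (block_codes : List String) : List (String × List String) :=
  (block_codes.foldl
    (fun d code =>
      if PySem.Str.len code ≠ 10 then d
      else
        let market := PySem.Str.slice code none (some 4)
        let codelist_code := PySem.Str.slice code (some 4) none
        d.modify market [] (fun l => l ++ [codelist_code]))
    (PySem.Dict.empty : PySem.Dict String (List String))).items

-- ===== PORT B =====
def iter_block_market_codes_alt (block_codes : List String) : List (String × List String) :=
  let codes := block_codes.filter (fun c => PySem.Str.len c == 10)
  let markets := codes.foldl
    (fun ms c =>
      let m := PySem.Str.slice c none (some 4)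
      if ms.contains m then ms else ms ++ [m]) ([] : List String)
  markets.map (fun m =>
    (m, (codes.filter (fun c => PySem.Str.slice c none (some 4) == m)).map
          (fun c => PySem.Str.slice c (some 4) none)))

-- ===== PRECONDITION & SPEC =====
def Spec_iter_block_market_codes (block_codes : List String) (out : List (String × List String)) : Prop := out = iter_block_market_codes_alt block_codes
instance (block_codes : List String) (out : List (String × List String)) : Decidable (Spec_iter_block_market_codes block_codes out) := by unfold Spec_iter_block_market_codes; infer_instance

-- ===== CLAIM (what is proved, stated in full; the proofs are below) =====
def Claim_equal_iter_block_market_codes : Prop := ∀ (block_codes : List String), Dom_iter_block_market_codes block_codes → Spec_iter_block_market_codes block_codes (iter_block_market_codes block_codes)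

-- ===== LEMMAS AND PROOFS =====

lemma dict_items_eq_keys_map {ν : Type} (l : List (String × ν)) (d0 : ν)
    (h : (l.map Prod.fst).Nodup) :
    l = (l.map Prod.fst).map (fun k => (k, (PySem.Dict.mk l).getD k d0)) := by
  induction l with
  | nil => rfl
  | cons p t ih =>
    obtain ⟨k, v⟩ := p
    simp only [List.map_cons, List.nodup_cons] at h
    simp only [List.map_cons, List.cons.injEq]
    refine ⟨?_, ?_⟩
    · simp [PySem.Dict.getD, PySem.Dict.get?_mk_cons]
    · rw [List.map_congr_left (g := fun x => (x, (PySem.Dict.mk t).getD x d0)), ← ih h.2]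
      intro x hx
      have hne : (k == x) = false := by
        simp only [beq_eq_false_iff_ne]
        rintro rfl; exact h.1 hx
      simp [PySem.Dict.getD, PySem.Dict.get?_mk_cons, hne]


lemma ports_agree (bs : List String) : iter_block_market_codes bs = iter_block_market_codes_alt bs := by
  unfold iter_block_market_codes iter_block_market_codes_alt
  simp only []
  set codes := bs.filter (fun c => PySem.Str.len c == 10) with hcodes
  -- A's fold over bs equals the fold over the filtered list
  have h1 : (bs.foldl
      (fun d code =>
        if PySem.Str.len code ≠ 10 then d
        else
          let market := PySem.Str.slice code none (some 4)
          let codelist_code := PySem.Str.slice code (some 4) none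
          d.modify market [] (fun l => l ++ [codelist_code]))
      (PySem.Dict.empty : PySem.Dict String (List String)))
      = codes.foldl
        (fun d code => d.modify (PySem.Str.slice code none (some 4)) []
          (fun l => l ++ [PySem.Str.slice code (some 4) none]))
        PySem.Dict.empty := by
    have hfun : (fun (d : PySem.Dict String (List String)) code =>
        if PySem.Str.len code ≠ 10 then d
        else
          let market := PySem.Str.slice code none (some 4)
          let codelist_code := PySem.Str.slice code (some 4) none
          d.modify market [] (fun l => l ++ [codelist_code]))
        = (fun d code =>
            if (PySem.Str.len code == 10) = true then
              d.modify (PySem.Str.slice code none (some 4)) []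
                (fun l => l ++ [PySem.Str.slice code (some 4) none])
            else d) := by
      funext d c
      by_cases hl : PySem.Str.len c = 10
      · simp
      · simp
    rw [hfun, hcodes, List.foldl_filter]
  rw [h1]
  set d := codes.foldl
        (fun d code => d.modify (PySem.Str.slice code none (some 4)) []
          (fun l => l ++ [PySem.Str.slice code (some 4) none]))
        (PySem.Dict.empty : PySem.Dict String (List String)) with hd
  -- the fold as a fold over (prefix, suffix) pairs
  have hpairs : d = (codes.map (fun c => (PySem.Str.slice c none (some 4), PySem.Str.slice c (some 4) none))).foldl
      (fun d p => d.modify p.1 [] (fun l => l ++ [p.2])) PySem.Dict.empty := by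
    rw [List.foldl_map]
  -- keys
  have hkeys : d.keys = codes.foldl
      (fun ms c => if ms.contains (PySem.Str.slice c none (some 4)) then ms else ms ++ [PySem.Str.slice c none (some 4)]) [] := by
    rw [hd, PySem.Dict.keys_foldl_modify_key codes (fun c => PySem.Str.slice c none (some 4)) []
      (fun _ c => (fun l => l ++ [PySem.Str.slice c (some 4) none]))]
    rw [PySem.Set.update_map_eq_foldl_add]
    rfl
  have hnodup : d.keys.Nodup := by
    rw [hd]
    exact PySem.Dict.nodup_keys_foldl_modify_key codes _ [] _ _ (by simp [PySem.Dict.empty, PySem.Dict.keys])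
  -- items = keys.map (k, getD k [])
  have hitems : d.items = d.keys.map (fun k => (k, d.getD k [])) := by
    have := dict_items_eq_keys_map d.items [] (by exact hnodup)
    simpa [PySem.Dict.keys] using this
  rw [hitems, ← hkeys]
  apply List.map_congr_left
  intro m _
  have hg : d.getD m [] = (codes.filter (fun c => PySem.Str.slice c none (some 4) == m)).map
      (fun c => PySem.Str.slice c (some 4) none) := by
    rw [hpairs, PySem.Dict.getD_foldl_modify_append]
    simp [PySem.Dict.getD, PySem.Dict.get?, PySem.Dict.empty, List.filter_map, Function.comp_def]
  rw [hg]

-- ===== VERDICT (by name: the statement is the Claim_ definition above) =====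
theorem iter_block_market_codes_spec : Claim_equal_iter_block_market_codes := by
  intro bs _
  exact ports_agree bs
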